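-- pv_equiv track=rewrite | github.com/Shin-jongwhan/AI_private | nesting_loop_calulator.py | nested_sub
-- ===== SOURCE A (Python) =====
-- def nested_sub(lsNesting):
--     """
--     모든 조합에 대해 (x1 - x2 - ... - xk)를 합산.
--     공식: +term(L1) - term(L2) - ... - term(Lk)
--           term(Lm) = (sum(L_m)) * (∏_{r≠m} |L_r|)
--
--     시간 복잡도:
--       - 나이브: O(∏ n_m)
--       - 본 함수: O(∑ n_m + k)
--         * 합계 계산 비용이 지배 → O(∑ n_m)
--     """
--     lsLens = [len(lsList) for lsList in lsNesting]
--     if any(nLen == 0 for nLen in lsLens):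
--         return 0
--
--     nProd_all = 1
--     for nLen in lsLens:
--         nProd_all *= nLen
--
--     nTotal = 0
--     for nIdx, lsList in enumerate(lsNesting):
--         nSum_current = sum(lsList)
--         nMult_others = nProd_all // lsLens[nIdx]
--         if nIdx == 0:                                              # 첫 리스트는 +
--             nTotal += nSum_current * nMult_others
--         else:                                                      # 나머지는 -
--             nTotal -= nSum_current * nMult_others
--     return nTotal
-- ===== SOURCE B (Python) =====
-- def _go(lists):
--     # returns (S, C): C = number of combinations of `lists`,
--     # S = sum over all combinations of -(x1 + x2 + ... + xk)
--     if not lists: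
--         return (0, 1)
--     s, c = _go(lists[1:])
--     lst = lists[0]
--     return (len(lst) * s - sum(lst) * c, len(lst) * c)
--
-- def nested_sub(lsNesting):
--     if not lsNesting:
--         return 0
--     head = lsNesting[0]
--     s, c = _go(lsNesting[1:])
--     return sum(head) * c + len(head) * s
-- ===== Notes on version B (the rewrite author's own statement) =====
-- stated objective: alternative
-- what changed: Replaces A's closed formula (length list, emptiness guard, global product, per-list exact floor-division and sign-by-index loop) with a single structural recursion that carries the pair (signed sum over all tail combinations, combination count), using no division and no emptiness check.
import Mathlib
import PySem

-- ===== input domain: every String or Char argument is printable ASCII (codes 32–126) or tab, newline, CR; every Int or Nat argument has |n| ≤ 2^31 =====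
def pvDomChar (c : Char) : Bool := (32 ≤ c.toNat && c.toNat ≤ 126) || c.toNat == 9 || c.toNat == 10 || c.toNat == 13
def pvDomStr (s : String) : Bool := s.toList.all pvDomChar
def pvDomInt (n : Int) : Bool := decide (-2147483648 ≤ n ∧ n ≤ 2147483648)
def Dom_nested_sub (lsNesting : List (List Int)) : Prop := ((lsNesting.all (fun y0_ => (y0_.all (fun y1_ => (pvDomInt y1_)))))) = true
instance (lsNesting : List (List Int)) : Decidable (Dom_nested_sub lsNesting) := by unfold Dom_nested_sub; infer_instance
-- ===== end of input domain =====

-- B replaces A's closed formula (global product + exact division per list) by a single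
-- structural recursion carrying the pair (signed tail sum, combination count); objective:
-- alternative decomposition of the same O(Σ n_m) cost, with no division and no emptiness guard.

-- ===== PORT A =====
def nested_sub (lsNesting : List (List Int)) : Int :=
  let lsLens : List Int := lsNesting.map (fun lsList => (lsList.length : Int))
  if lsLens.any (fun nLen => nLen == 0) then 0
  else
    let nProd_all : Int := lsLens.foldl (fun a b => a * b) 1
    -- lsLens[nIdx]: the index comes from enumerate, so it is always in range (pyGetD is exact here)
    (PySem.List.enumerate lsNesting 0).foldl
      (fun nTotal p =>
        let nSum_current := p.2.sum
        let nMult_others := PySem.Int.floordiv nProd_all (PySem.List.pyGetD lsLens p.1 0)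
        if p.1 == 0 then nTotal + nSum_current * nMult_others
        else nTotal - nSum_current * nMult_others) 0

-- ===== PORT B =====
-- _go(lists) from Source B: (S, C) with C = #combinations, S = Σ over combinations of -(x1+…+xk)
def nestedGo : List (List Int) → Int × Int
  | [] => (0, 1)
  | lst :: rest =>
    let sc := nestedGo rest
    ((lst.length : Int) * sc.1 - lst.sum * sc.2, (lst.length : Int) * sc.2)

def nested_sub_alt (lsNesting : List (List Int)) : Int :=
  match lsNesting with
  | [] => 0
  | head :: rest =>
    let sc := nestedGo rest
    head.sum * sc.2 + (head.length : Int) * sc.1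

-- ===== PRECONDITION & SPEC =====
def Spec_nested_sub (lsNesting : List (List Int)) (out : Int) : Prop := out = nested_sub_alt lsNesting
instance (lsNesting : List (List Int)) (out : Int) : Decidable (Spec_nested_sub lsNesting out) := by unfold Spec_nested_sub; infer_instance

-- ===== CLAIM (what is proved, stated in full; the proofs are below) =====
def Claim_equal_nested_sub : Prop := ∀ (lsNesting : List (List Int)), Dom_nested_sub lsNesting → Spec_nested_sub lsNesting (nested_sub lsNesting)

-- ===== LEMMAS AND PROOFS =====

-- product of the lengths, the quantity A divides by and B's second component
def lensProd (ls : List (List Int)) : Int := (ls.map (fun l => (l.length : Int))).prod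

theorem nestedGo_snd (ls : List (List Int)) : (nestedGo ls).2 = lensProd ls := by
  induction ls with
  | nil => simp [nestedGo, lensProd]
  | cons l r ih =>
    simp only [nestedGo, lensProd, List.map_cons, List.prod_cons]
    rw [ih, lensProd]

theorem nestedGo_of_empty (ls : List (List Int)) (h : ∃ l ∈ ls, l = []) :
    nestedGo ls = (0, 0) := by
  induction ls with
  | nil => simp at h
  | cons l r ih =>
    rcases h with ⟨l', hl', he⟩
    rcases List.mem_cons.1 hl' with rfl | hmem
    · simp [nestedGo, he]
    · simp [nestedGo, ih ⟨l', hmem, he⟩]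

theorem mem_enumerate_spec {α : Type} (ls : List α) (s : Int) (p : Int × α)
    (hp : p ∈ PySem.List.enumerate ls s) :
    ∃ k : Nat, p.1 = s + (k : Int) ∧ ls[k]? = some p.2 := by
  induction ls generalizing s with
  | nil => simp [PySem.List.enumerate_nil] at hp
  | cons x xs ih =>
    rw [PySem.List.enumerate_cons] at hp
    rcases List.mem_cons.1 hp with rfl | hmem
    · exact ⟨0, by simp⟩
    · rcases ih (s + 1) hmem with ⟨k, hk1, hk2⟩
      exact ⟨k + 1, by push_cast; omega, by simpa using hk2⟩

theorem len_dvd_lensProd (ls : List (List Int)) (l : List Int) (h : l ∈ ls) :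
    (l.length : Int) ∣ lensProd ls :=
  List.dvd_prod (List.mem_map.2 ⟨l, h, rfl⟩)

theorem map_snd_enumerate_comp {α β : Type} (xs : List α) (s : Int) (g : α → β) :
    (PySem.List.enumerate xs s).map (fun p => g p.2) = xs.map g := by
  induction xs generalizing s with
  | nil => simp [PySem.List.enumerate_nil]
  | cons x xs ih => simp [PySem.List.enumerate_cons, ih]

theorem minus_sum (r : List (List Int)) (hne : ∀ l ∈ r, l ≠ []) :
    (r.map (fun l => -(l.sum * (lensProd r / (l.length : Int))))).sum = (nestedGo r).1 := by
  induction r with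
  | nil => simp [nestedGo]
  | cons l r' ih =>
    have hl : (l.length : Int) ≠ 0 := by
      have := hne l (List.mem_cons_self)
      simpa using this
    have hP : lensProd (l :: r') = (l.length : Int) * lensProd r' := by
      simp [lensProd, List.prod_cons]
    rw [List.map_cons, List.sum_cons, hP]
    rw [Int.mul_ediv_cancel_left _ hl]
    have htail : (r'.map (fun l' => -(l'.sum * ((l.length : Int) * lensProd r' / (l'.length : Int))))).sum
        = (l.length : Int) * (r'.map (fun l' => -(l'.sum * (lensProd r' / (l'.length : Int))))).sum := by
      rw [← List.sum_map_mul_left]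
      apply congrArg
      apply List.map_congr_left
      intro l' hl'
      rw [Int.mul_ediv_assoc _ (len_dvd_lensProd r' l' hl')]
      ring
    rw [htail, ih (fun l' h => hne l' (List.mem_cons_of_mem _ h))]
    simp only [nestedGo]
    rw [nestedGo_snd]
    ring

theorem A_eq_B_no_empty (ls : List (List Int)) (hne : ∀ l ∈ ls, l ≠ []) :
    nested_sub ls = nested_sub_alt ls := by
  have hcond : (ls.map (fun l => ((l.length : Int)))).any (fun n => n == 0) = false := by
    simp only [List.any_eq_false]
    intro n hn
    rcases List.mem_map.1 hn with ⟨l, hl, rfl⟩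
    have := hne l hl
    simp_all
  have hprod : (ls.map (fun l => ((l.length : Int)))).foldl (fun a b => a * b) 1 = lensProd ls := by
    rw [lensProd, List.prod_eq_foldl]
  -- rewrite A's loop body: the index lookup is the element's own length, and // is exact division
  have hbody :
      (PySem.List.enumerate ls 0).foldl
        (fun nTotal p =>
          let nSum_current := p.2.sum
          let nMult_others := PySem.Int.floordiv (lensProd ls) (PySem.List.pyGetD (ls.map (fun l => ((l.length : Int)))) p.1 0)
          if p.1 == 0 then nTotal + nSum_current * nMult_others
          else nTotal - nSum_current * nMult_others) 0
      = (PySem.List.enumerate ls 0).foldl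
        (fun nTotal p =>
          nTotal + (if p.1 == 0 then p.2.sum * (lensProd ls / (p.2.length : Int))
                    else -(p.2.sum * (lensProd ls / (p.2.length : Int))))) 0 := by
    apply PySem.List.foldl_congr_mem
    intro acc p hp
    rcases mem_enumerate_spec ls 0 p hp with ⟨k, hk1, hk2⟩
    have hl : p.2 ∈ ls := List.mem_of_getElem? hk2
    have hlen : 0 < (p.2.length : Int) := by
      have := hne p.2 hl
      have : p.2.length ≠ 0 := by simpa [List.length_eq_zero_iff] using this
      omega
    have hget : PySem.List.pyGetD (ls.map (fun l => ((l.length : Int)))) p.1 0 = (p.2.length : Int) := by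
      rw [hk1]
      simp only [zero_add, PySem.List.pyGetD_natCast]
      simp [List.getD, List.getElem?_map, hk2]
    rw [hget, PySem.Int.floordiv_eq_ediv_of_pos hlen]
    split <;> ring
  rw [nested_sub]
  simp only [hcond, Bool.false_eq_true, if_false, hprod, hbody]
  rw [PySem.List.foldl_add _ _ 0, zero_add]
  cases ls with
  | nil => simp [nested_sub_alt, PySem.List.enumerate_nil]
  | cons h r =>
    rw [PySem.List.enumerate_cons, List.map_cons, List.sum_cons]
    simp only [zero_add]
    have hh : (h.length : Int) ≠ 0 := by
      have := hne h (List.mem_cons_self)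
      simpa using this
    have hP : lensProd (h :: r) = (h.length : Int) * lensProd r := by
      simp [lensProd, List.prod_cons]
    have htail :
        ((PySem.List.enumerate r 1).map
          (fun p => (if p.1 == 0 then p.2.sum * (lensProd (h :: r) / (p.2.length : Int))
                     else -(p.2.sum * (lensProd (h :: r) / (p.2.length : Int)))))).sum
        = (h.length : Int) * (nestedGo r).1 := by
      have hmap :
          (PySem.List.enumerate r 1).map
            (fun p => (if p.1 == 0 then p.2.sum * (lensProd (h :: r) / (p.2.length : Int))
                       else -(p.2.sum * (lensProd (h :: r) / (p.2.length : Int)))))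
          = (PySem.List.enumerate r 1).map
            (fun p => ((h.length : Int)) * -(p.2.sum * (lensProd r / (p.2.length : Int)))) := by
        apply List.map_congr_left
        intro p hp
        rcases mem_enumerate_spec r 1 p hp with ⟨k, hk1, hk2⟩
        have hp1 : (p.1 == 0) = false := by
          simp only [beq_eq_false_iff_ne]
          omega
        have hmem : p.2 ∈ r := List.mem_of_getElem? hk2
        rw [hp1]
        simp only [Bool.false_eq_true, if_false]
        rw [hP, Int.mul_ediv_assoc _ (len_dvd_lensProd r p.2 hmem)]
        ring
      rw [hmap,
        map_snd_enumerate_comp r 1 (fun l => ((h.length : Int)) * -(l.sum * (lensProd r / (l.length : Int)))),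
        List.sum_map_mul_left, minus_sum r (fun l hl => hne l (List.mem_cons_of_mem _ hl))]
    rw [htail]
    have hhead : (if (((0 : Int), h).1 == 0) = true
        then ((0 : Int), h).2.sum * (lensProd (h :: r) / ((((0 : Int), h).2.length : Int)))
        else -(((0 : Int), h).2.sum * (lensProd (h :: r) / ((((0 : Int), h).2.length : Int)))))
        = h.sum * lensProd r := by
      simp only [BEq.rfl, if_true, hP]
      rw [Int.mul_ediv_cancel_left _ hh]
    rw [hhead, nested_sub_alt]
    rw [nestedGo_snd]

theorem A_eq_B_some_empty (ls : List (List Int)) (hs : ∃ l ∈ ls, l = []) :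
    nested_sub ls = nested_sub_alt ls := by
  have hcond : (ls.map (fun l => ((l.length : Int)))).any (fun n => n == 0) = true := by
    rcases hs with ⟨l, hl, rfl⟩
    simp only [List.any_eq_true]
    exact ⟨0, List.mem_map.2 ⟨[], hl, by simp⟩, by simp⟩
  have hA : nested_sub ls = 0 := by rw [nested_sub]; simp [hcond]
  rw [hA]
  rcases hs with ⟨l, hl, rfl⟩
  cases ls with
  | nil => simp at hl
  | cons h r =>
    rcases List.mem_cons.1 hl with rfl | hmem
    · simp [nested_sub_alt]
    · rw [nested_sub_alt]
      simp [nestedGo_of_empty r ⟨[], hmem, rfl⟩]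

-- ===== VERDICT (by name: the statement is the Claim_ definition above) =====
theorem nested_sub_spec : Claim_equal_nested_sub := by
  intro ls _
  unfold Spec_nested_sub
  by_cases h : ∃ l ∈ ls, l = []
  · exact A_eq_B_some_empty ls h
  · exact A_eq_B_no_empty ls (fun l hl he => h ⟨l, hl, he⟩)
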